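-- pv_equiv track=rewrite | github.com/yongjian16/SteinerTree | test.py | with_terminals
-- ===== SOURCE A (Python) =====
-- def with_terminals(node, edge_dict, terminals):
--     if node == "root" or node in terminals:
--         return True
--     if node in edge_dict:
--         for neighbor in edge_dict[node]:
--             if neighbor in terminals:
--                 return True
--         found_in_neighbors = False
--         for neighbor in edge_dict[node]:
--             found_in_neighbors = found_in_neighbors or with_terminals(neighbor, edge_dict, terminals)
--         return found_in_neighbors
--     else:
--         return False
-- ===== SOURCE B (Python) =====
-- def with_terminals(node, edge_dict, terminals):
--     # Iterative DFS with a visited set: each node is expanded at most once,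
--     # so shared sub-DAGs are not re-explored and cycles cannot loop.
--     terms = set(terminals)
--     stack = [node]
--     visited = set()
--     while stack:
--         v = stack.pop()
--         if v == "root" or v in terms:
--             return True
--         if v in visited:
--             continue
--         visited.add(v)
--         stack.extend(edge_dict.get(v, []))
--     return False
-- ===== Notes on version B (the rewrite author's own statement) =====
-- stated objective: alternative
-- what changed: Replaced A's unmemoized recursive search (which re-explores shared successors and recurses forever on reachable cycles) by an iterative worklist traversal with a visited set that expands every node at most once and terminates on every input.
import Mathlib
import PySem

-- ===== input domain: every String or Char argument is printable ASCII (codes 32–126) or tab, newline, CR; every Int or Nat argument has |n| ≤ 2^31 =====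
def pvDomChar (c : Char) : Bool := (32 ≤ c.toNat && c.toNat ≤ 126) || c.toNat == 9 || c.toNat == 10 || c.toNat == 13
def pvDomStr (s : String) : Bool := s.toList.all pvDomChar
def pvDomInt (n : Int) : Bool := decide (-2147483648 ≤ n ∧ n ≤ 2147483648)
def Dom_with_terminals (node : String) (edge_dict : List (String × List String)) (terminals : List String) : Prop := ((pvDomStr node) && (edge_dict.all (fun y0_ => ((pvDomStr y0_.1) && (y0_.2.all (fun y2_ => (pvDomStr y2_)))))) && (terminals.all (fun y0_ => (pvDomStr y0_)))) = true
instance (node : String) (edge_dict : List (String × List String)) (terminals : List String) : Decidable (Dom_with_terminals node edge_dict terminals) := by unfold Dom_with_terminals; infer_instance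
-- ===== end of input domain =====

-- B replaces A's unmemoized recursion by an iterative worklist search with a visited
-- set (objective: alternative — each node is expanded at most once).

-- ===== PORT A =====
-- A is recursive with no structural measure; the port uses a fuel of edge_dict.length + 1,
-- which is provably enough because a shortest witnessing path passes each key at most once.
def aFuelGo (edge_dict : List (String × List String)) (terminals : List String) : Nat → String → Bool
  | 0, _ => false
  | f+1, node =>
    if node == "root" || terminals.contains node then true
    else
      match (PySem.Dict.mk edge_dict).get? node with
      | some neighbors =>
        if neighbors.any (fun n => terminals.contains n) then true
        else neighbors.foldl (fun acc n => acc || aFuelGo edge_dict terminals f n) false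
      | none => false

def with_terminals (node : String) (edge_dict : List (String × List String)) (terminals : List String) : Bool :=
  aFuelGo edge_dict terminals (edge_dict.length + 1) node

-- ===== PORT B =====
-- Lean list head = top of the Python stack (stack.pop pops the end), hence the .reverse on extend.
-- Fuel: the loop runs at most once per stack entry and every distinct node is expanded at most
-- once, so 1 + Σ_{u ∈ distinct nodes} (1 + |succ u|) iterations always suffice (proved below).
def bStack (edge_dict : List (String × List String)) (terminals : List String) : Nat → List String → List String → Bool
  | _, _, [] => false
  | 0, _, _ :: _ => false
  | f+1, visited, v :: rest =>
    if v == "root" || terminals.contains v then true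
    else if visited.contains v then bStack edge_dict terminals f visited rest
    else bStack edge_dict terminals f (v :: visited)
        ((((PySem.Dict.mk edge_dict).get? v).getD []).reverse ++ rest)

def bFuelOf (node : String) (edge_dict : List (String × List String)) : Nat :=
  1 + ((node :: edge_dict.flatMap (fun kv => kv.2)).dedup.map
        (fun u => 1 + (((PySem.Dict.mk edge_dict).get? u).getD []).length)).sum

def with_terminals_alt (node : String) (edge_dict : List (String × List String)) (terminals : List String) : Bool :=
  bStack edge_dict terminals (bFuelOf node edge_dict) [] [node]

-- ===== PRECONDITION & SPEC =====
-- "good" nodes: the targets of the search (root, or a terminal)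
def pvGood (terminals : List String) (v : String) : Bool := (v == "root") || terminals.contains v

def pvSucc (edge_dict : List (String × List String)) (v : String) : List String :=
  ((PySem.Dict.mk edge_dict).get? v).getD []

-- set of nodes reachable from init via `step` (every shortest path passes each key at most once,
-- so edge_dict.length closure rounds saturate)
def pvReachBy (edge_dict : List (String × List String)) (step : String → List String) (init : List String) : List String :=
  (fun acc => (acc ++ acc.flatMap step).dedup)^[edge_dict.length] init

def pvReach (edge_dict : List (String × List String)) (init : List String) : List String :=
  pvReachBy edge_dict (pvSucc edge_dict) init

-- a good node is reachable from n (this is the value both programs compute)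
def pvHasT (edge_dict : List (String × List String)) (terminals : List String) (n : String) : Bool :=
  (pvReach edge_dict [n]).any (pvGood terminals)

-- A actually recurses at v only if v is not good, is a key, and no direct neighbour is a terminal
def pvRecursing (edge_dict : List (String × List String)) (terminals : List String) (v : String) : Bool :=
  !pvGood terminals v && ((PySem.Dict.mk edge_dict).get? v).isSome
    && !(pvSucc edge_dict v).any (fun n => terminals.contains n)

-- the neighbours A actually recurses into: the prefix of the list up to and including the first
-- neighbour from which a good node is reachable (Python's `or` short-circuits after that one)
def pvCallPrefix (edge_dict : List (String × List String)) (terminals : List String) : List String → List String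
  | [] => []
  | x :: r => if pvHasT edge_dict terminals x then [x] else x :: pvCallPrefix edge_dict terminals r

def pvGSucc (edge_dict : List (String × List String)) (terminals : List String) (v : String) : List String :=
  if pvRecursing edge_dict terminals v then pvCallPrefix edge_dict terminals (pvSucc edge_dict v) else []

-- Pre_ excludes exactly the inputs on which the Python A recurses forever (RecursionError):
-- those where the call graph A actually explores (edges pvGSucc) has a cycle reachable from node;
-- on every input where A returns a value, Pre_ holds.
def Pre_with_terminals (node : String) (edge_dict : List (String × List String)) (terminals : List String) : Prop :=
  ∀ k ∈ pvReachBy edge_dict (pvGSucc edge_dict terminals) [node],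
    k ∉ pvReachBy edge_dict (pvGSucc edge_dict terminals) (pvGSucc edge_dict terminals k)
instance (node : String) (edge_dict : List (String × List String)) (terminals : List String) : Decidable (Pre_with_terminals node edge_dict terminals) := by unfold Pre_with_terminals; infer_instance

def pvWitness_with_terminals : String × (List (String × List String)) × List String :=
  ("a", [("a", ["b"]), ("b", [])], ["b"])

def Spec_with_terminals (node : String) (edge_dict : List (String × List String)) (terminals : List String) (out : Bool) : Prop := out = with_terminals_alt node edge_dict terminals
instance (node : String) (edge_dict : List (String × List String)) (terminals : List String) (out : Bool) : Decidable (Spec_with_terminals node edge_dict terminals out) := by unfold Spec_with_terminals; infer_instance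

-- ===== CLAIM (what is proved, stated in full; the proofs are below) =====
def Claim_equal_with_terminals : Prop := ∀ (node : String) (edge_dict : List (String × List String)) (terminals : List String), Dom_with_terminals node edge_dict terminals → Pre_with_terminals node edge_dict terminals → Spec_with_terminals node edge_dict terminals (with_terminals node edge_dict terminals)


-- ===== LEMMAS AND PROOFS =====

-- reachability witnessed by an explicit chain of nodes
def pvT (d : List (String × List String)) (ts : List String) (u : String) : Prop :=
  ∃ c : List String, List.IsChain (fun a b => b ∈ pvSucc d a) c ∧ c.head? = some u ∧
    ∃ w, c.getLast? = some w ∧ pvGood ts w = true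

theorem pvT_good {d : List (String × List String)} {ts : List String} {u : String}
    (h : pvGood ts u = true) : pvT d ts u :=
  ⟨[u], List.isChain_singleton u, rfl, u, rfl, h⟩

theorem pvT_step {d : List (String × List String)} {ts : List String} {u b : String}
    (hb : b ∈ pvSucc d u) (h : pvT d ts b) : pvT d ts u := by
  obtain ⟨c, hc, hh, w, hl, hw⟩ := h
  cases c with
  | nil => simp at hh
  | cons x t =>
    have hxb : x = b := by simpa using hh
    subst hxb
    exact ⟨u :: x :: t, List.isChain_cons_cons.2 ⟨hb, hc⟩, rfl, w,
      by simpa [List.getLast?_cons_cons] using hl, hw⟩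

theorem pvT_cases {d : List (String × List String)} {ts : List String} {u : String}
    (h : pvT d ts u) : pvGood ts u = true ∨ ∃ b ∈ pvSucc d u, pvT d ts b := by
  obtain ⟨c, hc, hh, w, hl, hw⟩ := h
  cases c with
  | nil => simp at hh
  | cons x t =>
    have hxu : x = u := by simpa using hh
    subst hxu
    cases t with
    | nil =>
      left
      have hwu : x = w := by simpa using hl
      exact hwu ▸ hw
    | cons b r =>
      right
      obtain ⟨hub, hc'⟩ := List.isChain_cons_cons.1 hc
      exact ⟨b, hub, ⟨b :: r, hc', rfl, w, by simpa [List.getLast?_cons_cons] using hl, hw⟩⟩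

theorem foldl_or_eq_any {α : Type} (g : α → Bool) (l : List α) (b : Bool) :
    l.foldl (fun acc n => acc || g n) b = (b || l.any g) := by
  induction l generalizing b with
  | nil => simp
  | cons x t ih => simp [List.foldl_cons, ih, Bool.or_assoc]

theorem aFuel_sound (d : List (String × List String)) (ts : List String) :
    ∀ (f : Nat) (u : String), aFuelGo d ts f u = true → pvT d ts u := by
  intro f
  induction f with
  | zero => intro u h; simp [aFuelGo] at h
  | succ f ih =>
    intro u h
    rw [aFuelGo] at h
    by_cases hg : (u == "root" || ts.contains u) = true
    · exact pvT_good (by simpa [pvGood] using hg)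
    · rw [if_neg hg] at h
      cases hns : (PySem.Dict.mk d).get? u with
      | none => rw [hns] at h; exact absurd h (by simp)
      | some ns =>
        rw [hns] at h
        simp only [] at h
        have hsucc : pvSucc d u = ns := by simp [pvSucc, hns]
        by_cases ht : ns.any (fun n => ts.contains n) = true
        · obtain ⟨n, hn, hcn⟩ := List.any_eq_true.1 ht
          exact pvT_step (hsucc ▸ hn) (pvT_good (by simp only [pvGood, Bool.or_eq_true]; exact Or.inr hcn))
        · rw [if_neg ht, foldl_or_eq_any] at h
          obtain ⟨n, hn, hrec⟩ := List.any_eq_true.1 (by simpa using h)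
          exact pvT_step (hsucc ▸ hn) (ih n hrec)

theorem aFuel_mono (d : List (String × List String)) (ts : List String) :
    ∀ (f g : Nat) (u : String), f ≤ g → aFuelGo d ts f u = true → aFuelGo d ts g u = true := by
  intro f
  induction f with
  | zero => intro g u _ h; simp [aFuelGo] at h
  | succ f ih =>
    intro g u hle h
    cases g with
    | zero => omega
    | succ g =>
      rw [aFuelGo] at h ⊢
      by_cases hg : (u == "root" || ts.contains u) = true
      · rw [if_pos hg]
      · rw [if_neg hg] at h ⊢
        cases hns : (PySem.Dict.mk d).get? u with
        | none => rw [hns] at h; exact absurd h (by simp)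
        | some ns =>
          rw [hns] at h
          simp only [] at h ⊢
          by_cases ht : ns.any (fun n => ts.contains n) = true
          · rw [if_pos ht]
          · rw [if_neg ht, foldl_or_eq_any] at h ⊢
            obtain ⟨n, hn, hrec⟩ := List.any_eq_true.1 (by simpa using h)
            simpa using List.any_eq_true.2 ⟨n, hn, ih g n (by omega) hrec⟩

theorem chain_run (d : List (String × List String)) (ts : List String) :
    ∀ (c : List String) (u : String), List.IsChain (fun a b => b ∈ pvSucc d a) c →
      c.head? = some u → (∃ w, c.getLast? = some w ∧ pvGood ts w = true) →
      aFuelGo d ts c.length u = true := by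
  intro c
  induction c with
  | nil => intro u _ hh _; simp at hh
  | cons x t ih =>
    intro u hc hh hw
    have hxu : x = u := by simpa using hh
    subst hxu
    cases t with
    | nil =>
      obtain ⟨w, hl, hgw⟩ := hw
      have hwx : x = w := by simpa using hl
      subst hwx
      simpa [aFuelGo, List.length_cons, pvGood] using Or.inl (by simpa [pvGood] using hgw)
    | cons b r =>
      obtain ⟨hxb, hc'⟩ := List.isChain_cons_cons.1 hc
      have hw' : ∃ w, (b :: r).getLast? = some w ∧ pvGood ts w = true := by
        obtain ⟨w, hl, hgw⟩ := hw
        exact ⟨w, by simpa [List.getLast?_cons_cons] using hl, hgw⟩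
      have hrec : aFuelGo d ts (b :: r).length b = true := ih b hc' rfl hw'
      simp only [List.length_cons]
      rw [aFuelGo]
      by_cases hg : (x == "root" || ts.contains x) = true
      · rw [if_pos hg]
      · rw [if_neg hg]
        have hne : pvSucc d x ≠ [] := fun hnil => by simp [hnil] at hxb
        cases hns : (PySem.Dict.mk d).get? x with
        | none => exact absurd (by simp [pvSucc, hns]) hne
        | some ns =>
          simp only []
          have hbn : b ∈ ns := by simpa [pvSucc, hns] using hxb
          by_cases ht : ns.any (fun n => ts.contains n) = true
          · rw [if_pos ht]
          · rw [if_neg ht, foldl_or_eq_any]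
            simpa using List.any_eq_true.2 ⟨b, hbn, hrec⟩

theorem dup_split {α : Type} [DecidableEq α] :
    ∀ (l : List α), ¬ l.Nodup → ∃ a l1 l2 l3, l = l1 ++ a :: l2 ++ a :: l3 := by
  intro l
  induction l with
  | nil => intro h; exact absurd List.nodup_nil h
  | cons a t ih =>
    intro h
    by_cases ha : a ∈ t
    · obtain ⟨s, s', rfl⟩ := List.append_of_mem ha
      exact ⟨a, [], s, s', by simp⟩
    · have hnt : ¬ t.Nodup := fun hn => h (List.nodup_cons.2 ⟨ha, hn⟩)
      obtain ⟨x, l1, l2, l3, rfl⟩ := ih hnt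
      exact ⟨x, a :: l1, l2, l3, by simp⟩

theorem chain_sources (d : List (String × List String)) :
    ∀ (c : List String), List.IsChain (fun a b => b ∈ pvSucc d a) c →
      ∀ x ∈ c.dropLast, pvSucc d x ≠ [] := by
  intro c
  induction c with
  | nil => intro _ x hx; simp at hx
  | cons a t ih =>
    intro hc x hx
    cases t with
    | nil => simp at hx
    | cons b r =>
      obtain ⟨hab, hc'⟩ := List.isChain_cons_cons.1 hc
      rw [List.dropLast_cons₂, List.mem_cons] at hx
      rcases hx with rfl | hx
      · exact fun h0 => by simp [h0] at hab
      · exact ih hc' x hx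

theorem keys_of_succ_ne (d : List (String × List String)) (x : String)
    (h : pvSucc d x ≠ []) : x ∈ d.map Prod.fst := by
  by_contra hx
  have h0 : (PySem.Dict.mk d).get? x = none :=
    (PySem.Dict.get?_eq_none_iff_not_mem_keys _ _).2 (by simpa using hx)
  simp [pvSucc, h0] at h

theorem len_le_dedup (l K : List String) (h : ∀ x ∈ l, x ∈ K) (hn : l.Nodup) :
    l.length ≤ K.dedup.length := by
  have h2 : l.toFinset ⊆ K.toFinset := by
    intro x hx; simp only [List.mem_toFinset] at *; exact h x hx
  have h3 := Finset.card_le_card h2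
  simp only [List.card_toFinset] at h3
  rwa [hn.dedup] at h3

theorem shorten_aux (d : List (String × List String)) (ts : List String) :
    ∀ (n : Nat) (c : List String) (u : String), c.length ≤ n →
      List.IsChain (fun a b => b ∈ pvSucc d a) c → c.head? = some u →
      (∃ w, c.getLast? = some w ∧ pvGood ts w = true) →
      ∃ c' : List String, List.IsChain (fun a b => b ∈ pvSucc d a) c' ∧ c'.head? = some u ∧
        (∃ w, c'.getLast? = some w ∧ pvGood ts w = true) ∧ c'.length ≤ d.length + 1 := by
  intro n
  induction n using Nat.strong_induction_on with
  | _ n ih =>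
    intro c u hlen hc hh hw
    by_cases hle : c.length ≤ d.length + 1
    · exact ⟨c, hc, hh, hw, hle⟩
    · obtain ⟨w, hlw, hgw⟩ := hw
      have hsplit : c.dropLast ++ [w] = c := List.dropLast_append_getLast? w hlw
      have hkeys : ∀ x ∈ c.dropLast, x ∈ d.map Prod.fst := fun x hx =>
        keys_of_succ_ne d x (chain_sources d c hc x hx)
      have hnd : ¬ c.dropLast.Nodup := by
        intro hnd
        have h1 := len_le_dedup _ _ hkeys hnd
        have h2 : (d.map Prod.fst).dedup.length ≤ d.length :=
          le_trans (List.Sublist.length_le (List.dedup_sublist _)) (by simp)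
        have h3 : c.dropLast.length = c.length - 1 := List.length_dropLast
        omega
      obtain ⟨a, l1, l2, l3, hform⟩ := dup_split _ hnd
      have hc_eq : c = l1 ++ a :: (l2 ++ a :: (l3 ++ [w])) := by
        rw [← hsplit, hform]; simp
      have hchain2 : List.IsChain (fun a b => b ∈ pvSucc d a) (l1 ++ a :: (l3 ++ [w])) := by
        rw [hc_eq] at hc
        have h1 := List.isChain_split.1 hc
        have h2 := (List.isChain_cons_split.1 h1.2).2
        exact List.isChain_split.2 ⟨h1.1, h2⟩
      have hhead : (l1 ++ a :: (l3 ++ [w])).head? = some u := by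
        rw [hc_eq] at hh
        cases l1 with
        | nil => simpa using hh
        | cons p q =>
          rw [List.head?_append_of_ne_nil _ (by simp)]
          rw [List.head?_append_of_ne_nil _ (by simp)] at hh
          exact hh
      have hlast : (l1 ++ a :: (l3 ++ [w])).getLast? = some w := by
        have he : l1 ++ a :: (l3 ++ [w]) = (l1 ++ a :: l3) ++ [w] := by simp
        rw [he, List.getLast?_concat]
      have hlt : (l1 ++ a :: (l3 ++ [w])).length < n := by
        have e1 : c.length = l1.length + l2.length + l3.length + 3 := by
          rw [hc_eq]; simp; omega
        have e2 : (l1 ++ a :: (l3 ++ [w])).length = l1.length + l3.length + 2 := by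
          simp; omega
        omega
      exact ih _ hlt _ u le_rfl hchain2 hhead ⟨w, hlast, hgw⟩

theorem shorten (d : List (String × List String)) (ts : List String) (u : String)
    (h : pvT d ts u) :
    ∃ c : List String, List.IsChain (fun a b => b ∈ pvSucc d a) c ∧ c.head? = some u ∧
      (∃ w, c.getLast? = some w ∧ pvGood ts w = true) ∧ c.length ≤ d.length + 1 := by
  obtain ⟨c, hc, hh, hw⟩ := h
  exact shorten_aux d ts c.length c u le_rfl hc hh hw

theorem aFuel_complete (d : List (String × List String)) (ts : List String) (u : String)
    (h : pvT d ts u) : aFuelGo d ts (d.length + 1) u = true := by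
  obtain ⟨c, hc, hh, hw, hlen⟩ := shorten d ts u h
  exact aFuel_mono d ts c.length (d.length + 1) u hlen (chain_run d ts c u hc hh hw)

-- ==== B side ====

theorem bStack_sound (d : List (String × List String)) (ts : List String) :
    ∀ (f : Nat) (vis st : List String), bStack d ts f vis st = true →
      ∃ v ∈ st, pvT d ts v := by
  intro f
  induction f with
  | zero =>
    intro vis st h
    cases st with
    | nil => simp [bStack] at h
    | cons v rest => simp [bStack] at h
  | succ f ih =>
    intro vis st h
    cases st with
    | nil => simp [bStack] at h
    | cons v rest =>
      rw [bStack] at h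
      by_cases hg : (v == "root" || ts.contains v) = true
      · exact ⟨v, List.mem_cons_self, pvT_good (by simpa [pvGood] using hg)⟩
      · rw [if_neg hg] at h
        by_cases hv : vis.contains v = true
        · rw [if_pos hv] at h
          obtain ⟨v', hv', hT⟩ := ih vis rest h
          exact ⟨v', List.mem_cons_of_mem v hv', hT⟩
        · rw [if_neg hv] at h
          obtain ⟨v', hv', hT⟩ := ih _ _ h
          rcases List.mem_append.1 hv' with hl | hr
          · exact ⟨v, List.mem_cons_self, pvT_step (by simpa using hl) hT⟩
          · exact ⟨v', List.mem_cons_of_mem v hr, hT⟩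

theorem no_escape (d : List (String × List String)) (ts : List String) (S : List String)
    (hS : ∀ x ∈ S, pvGood ts x = false ∧ ∀ y ∈ pvSucc d x, y ∈ S) :
    ∀ u ∈ S, ¬ pvT d ts u := by
  have aux : ∀ (c : List String) (u : String), List.IsChain (fun a b => b ∈ pvSucc d a) c →
      c.head? = some u → (∃ w, c.getLast? = some w ∧ pvGood ts w = true) → u ∈ S → False := by
    intro c
    induction c with
    | nil => intro u _ hh _ _; simp at hh
    | cons x t ih =>
      intro u hc hh hw hu
      have hxu : x = u := by simpa using hh
      subst hxu
      cases t with
      | nil =>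
        obtain ⟨w, hl, hgw⟩ := hw
        have hwx : x = w := by simpa using hl
        subst hwx
        exact absurd hgw (by simp [(hS x hu).1])
      | cons b r =>
        obtain ⟨hxb, hc'⟩ := List.isChain_cons_cons.1 hc
        have hbS : b ∈ S := (hS x hu).2 b hxb
        obtain ⟨w, hl, hgw⟩ := hw
        exact ih b hc' rfl ⟨w, by simpa [List.getLast?_cons_cons] using hl, hgw⟩ hbS
  intro u hu hT
  obtain ⟨c, hc, hh, hw⟩ := hT
  exact aux c u hc hh hw hu

theorem filter_sum_drop (g : String → Nat) :
    ∀ (l : List String) (vis : List String) (v : String), l.Nodup → v ∈ l →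
      vis.contains v = false →
      ((l.filter (fun u => !vis.contains u)).map g).sum =
        ((l.filter (fun u => !(v :: vis).contains u)).map g).sum + g v := by
  intro l
  induction l with
  | nil => intro vis v _ hv _; simp at hv
  | cons a t ih =>
    intro vis v hnd hv hnc
    obtain ⟨hat, hndt⟩ := List.nodup_cons.1 hnd
    rcases List.mem_cons.1 hv with rfl | hvt
    · have hfeq : t.filter (fun u => !(v :: vis).contains u) = t.filter (fun u => !vis.contains u) :=
        List.filter_congr (fun x hx => by
          have hxv : (x == v) = false := by
            simp only [beq_eq_false_iff_ne]
            exact fun h => hat (h ▸ hx)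
          simp only [List.contains_cons, hxv, Bool.false_or])
      rw [List.filter_cons, List.filter_cons, hfeq]
      have c1 : (!vis.contains v) = true := by rw [hnc]; rfl
      have c2 : ¬ ((!(v :: vis).contains v) = true) := by simp
      rw [if_pos c1, if_neg c2]
      simp [Nat.add_comm]
    · have hav : (a == v) = false := by
        simp only [beq_eq_false_iff_ne]
        exact fun h => hat (h ▸ hvt)
      have hceq : ((v :: vis).contains a) = vis.contains a := by
        simp only [List.contains_cons, hav, Bool.false_or]
      rw [List.filter_cons, List.filter_cons, hceq]
      by_cases hca : vis.contains a = true
      · rw [if_neg (by rw [hca]; simp), if_neg (by rw [hca]; simp)]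
        exact ih vis v hndt hvt hnc
      · have hca2 : vis.contains a = false := by simpa using hca
        rw [if_pos (by rw [hca2]; rfl), if_pos (by rw [hca2]; rfl)]
        simp only [List.map_cons, List.sum_cons]
        rw [ih vis v hndt hvt hnc]
        omega

theorem bStack_complete (d : List (String × List String)) (ts : List String) (U : List String)
    (hU : ∀ v, ∀ y ∈ pvSucc d v, y ∈ U) :
    ∀ (f : Nat) (vis st : List String),
      (∀ x ∈ vis, pvGood ts x = false ∧ ∀ y ∈ pvSucc d x, y ∈ vis ++ st) →
      st ⊆ U →
      (∃ v ∈ vis ++ st, pvT d ts v) →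
      st.length + ((U.dedup.filter (fun u => !vis.contains u)).map
          (fun u => 1 + (pvSucc d u).length)).sum ≤ f →
      bStack d ts f vis st = true := by
  intro f
  induction f with
  | zero =>
    intro vis st hinv hstU hwit hf
    cases st with
    | nil =>
      exfalso
      obtain ⟨v, hv, hT⟩ := hwit
      rw [List.append_nil] at hv
      refine no_escape d ts vis (fun x hx => ⟨(hinv x hx).1, fun y hy => ?_⟩) v hv hT
      have h2 := (hinv x hx).2 y hy
      rwa [List.append_nil] at h2
    | cons v rest =>
      simp only [List.length_cons] at hf
      omega
  | succ f ih =>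
    intro vis st hinv hstU hwit hf
    cases st with
    | nil =>
      exfalso
      obtain ⟨v, hv, hT⟩ := hwit
      rw [List.append_nil] at hv
      refine no_escape d ts vis (fun x hx => ⟨(hinv x hx).1, fun y hy => ?_⟩) v hv hT
      have h2 := (hinv x hx).2 y hy
      rwa [List.append_nil] at h2
    | cons v rest =>
      rw [bStack]
      by_cases hg : (v == "root" || ts.contains v) = true
      · rw [if_pos hg]
      · rw [if_neg hg]
        have hgf : pvGood ts v = false := by
          unfold pvGood
          simpa using hg
        by_cases hv : vis.contains v = true
        · rw [if_pos hv]
          apply ih vis rest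
          · intro x hx
            refine ⟨(hinv x hx).1, fun y hy => ?_⟩
            have h2 := (hinv x hx).2 y hy
            rcases List.mem_append.1 h2 with h3 | h3
            · exact List.mem_append.2 (Or.inl h3)
            · rcases List.mem_cons.1 h3 with rfl | h4
              · exact List.mem_append.2 (Or.inl (by simpa using hv))
              · exact List.mem_append.2 (Or.inr h4)
          · exact fun y hy => hstU (List.mem_cons_of_mem v hy)
          · obtain ⟨v0, hv0, hT⟩ := hwit
            refine ⟨v0, ?_, hT⟩
            rcases List.mem_append.1 hv0 with h3 | h3
            · exact List.mem_append.2 (Or.inl h3)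
            · rcases List.mem_cons.1 h3 with rfl | h4
              · exact List.mem_append.2 (Or.inl (by simpa using hv))
              · exact List.mem_append.2 (Or.inr h4)
          · simp only [List.length_cons] at hf
            omega
        · rw [if_neg hv]
          have hv2 : vis.contains v = false := by simpa using hv
          have hvU : v ∈ U.dedup := List.mem_dedup.2 (hstU List.mem_cons_self)
          have hsum := filter_sum_drop (fun u => 1 + (pvSucc d u).length) U.dedup vis v
            (List.nodup_dedup U) hvU hv2
          apply ih (v :: vis) ((pvSucc d v).reverse ++ rest)
          · intro x hx
            rcases List.mem_cons.1 hx with rfl | hxv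
            · refine ⟨hgf, fun y hy => ?_⟩
              exact List.mem_append.2 (Or.inr (List.mem_append.2 (Or.inl (List.mem_reverse.2 hy))))
            · refine ⟨(hinv x hxv).1, fun y hy => ?_⟩
              have h2 := (hinv x hxv).2 y hy
              rcases List.mem_append.1 h2 with h3 | h3
              · exact List.mem_append.2 (Or.inl (List.mem_cons_of_mem v h3))
              · rcases List.mem_cons.1 h3 with rfl | h4
                · exact List.mem_append.2 (Or.inl List.mem_cons_self)
                · exact List.mem_append.2 (Or.inr (List.mem_append.2 (Or.inr h4)))
          · intro y hy
            rcases List.mem_append.1 hy with h3 | h3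
            · exact hU v y (List.mem_reverse.1 h3)
            · exact hstU (List.mem_cons_of_mem v h3)
          · obtain ⟨v0, hv0, hT⟩ := hwit
            rcases List.mem_append.1 hv0 with h3 | h3
            · exact ⟨v0, List.mem_append.2 (Or.inl (List.mem_cons_of_mem v h3)), hT⟩
            · rcases List.mem_cons.1 h3 with rfl | h4
              · rcases pvT_cases hT with hgood | ⟨b, hb, hTb⟩
                · exact absurd hgood (by simp [hgf])
                · exact ⟨b, List.mem_append.2 (Or.inr (List.mem_append.2
                    (Or.inl (List.mem_reverse.2 hb)))), hTb⟩
              · exact ⟨v0, List.mem_append.2 (Or.inr (List.mem_append.2 (Or.inr h4))), hT⟩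
          · simp only [] at hsum
            simp only [List.length_append, List.length_reverse, List.length_cons] at hf ⊢
            omega

theorem alt_eq_decide (node : String) (d : List (String × List String)) (ts : List String) :
    with_terminals_alt node d ts = true ↔ pvT d ts node := by
  constructor
  · intro h
    obtain ⟨v, hv, hT⟩ := bStack_sound d ts _ [] [node] h
    have hvn : v = node := by simpa using hv
    exact hvn ▸ hT
  · intro hT
    unfold with_terminals_alt bFuelOf
    apply bStack_complete d ts (node :: d.flatMap (fun kv => kv.2))
    · intro v y hy
      unfold pvSucc at hy
      cases hg : (PySem.Dict.mk d).get? v with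
      | none => rw [hg] at hy; simp at hy
      | some l =>
        rw [hg] at hy
        simp only [Option.getD_some] at hy
        have hmem : (v, l) ∈ d := PySem.Dict.mem_items_of_get?_eq_some _ hg
        exact List.mem_cons_of_mem _ (List.mem_flatMap.2 ⟨(v, l), hmem, hy⟩)
    · intro x hx
      simp at hx
    · intro y hy
      rw [List.mem_singleton] at hy
      subst hy
      exact List.mem_cons_self
    · exact ⟨node, by simp, hT⟩
    · simp [pvSucc]

-- ===== VERDICT (by name: the statement is the Claim_ definition above) =====
theorem with_terminals_spec : Claim_equal_with_terminals := by
  intro node d ts _ _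
  unfold Spec_with_terminals with_terminals
  rcases hA : aFuelGo d ts (d.length + 1) node with _ | _
  · rcases hB : with_terminals_alt node d ts with _ | _
    · rfl
    · exact absurd (aFuel_complete d ts node ((alt_eq_decide node d ts).1 hB)) (by simp [hA])
  · exact ((alt_eq_decide node d ts).2 (aFuel_sound d ts _ _ hA)).symm
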